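-- pv_equiv track=rewrite | github.com/tsariapkin/code_memory | src/code_memory/symbol_indexer.py | _build_deps
-- ===== SOURCE A (Python) =====
-- def _build_deps(calls, func_ranges, class_bases, import_names) -> list[dict]:
--     """Build dependency list from collected calls, func_ranges, class_bases, and import_names."""
--     deps = []
--     seen = set()
--
--     for call_name, call_line in calls:
--         enclosing = _find_enclosing_func(call_line, func_ranges)
--         if enclosing and enclosing != call_name:
--             key = (enclosing, call_name, "calls")
--             if key not in seen:
--                 seen.add(key)
--                 deps.append(
--                     {
--                         "source": enclosing,
--                         "target": call_name,
--                         "dep_type": "calls",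
--                     }
--                 )
--
--     # Append inheritance edges
--     for dep_type, source, target in class_bases:
--         key = (source, target, dep_type)
--         if key not in seen:
--             seen.add(key)
--             deps.append({"source": source, "target": target, "dep_type": dep_type})
--
--     # Append import edges
--     for call_name, call_line in calls:
--         if call_name in import_names:
--             enclosing = _find_enclosing_func(call_line, func_ranges)
--             if enclosing:
--                 key = (enclosing, call_name, "imports")
--                 if key not in seen:
--                     seen.add(key)
--                     deps.append({"source": enclosing, "target": call_name, "dep_type": "imports"})
--
--     return deps
--
-- def _find_enclosing_func(line: int, func_ranges: list) -> str | None: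
--     """Find which function contains the given line number."""
--     best = None
--     best_span = float("inf")
--     for name, start, end in func_ranges:
--         if start <= line <= end:
--             span = end - start
--             if span < best_span:
--                 best_span = span
--                 best = name
--     return best
-- ===== SOURCE B (Python) =====
-- def _build_deps(calls, func_ranges, class_bases, import_names) -> list[dict]:
--     """Build dependency list: sort ranges by span once, take the first stabbing
--     interval per call line (stable sort keeps A's tie-break), dedup via one helper."""
--     by_span = sorted(func_ranges, key=lambda r: r[2] - r[1])
--     enc = [next((n for n, s, e in by_span if s <= line <= e), None)
--            for _, line in calls]
--     imports = set(import_names)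
--     deps = []
--     seen = set()
--
--     def add(source, target, dep_type):
--         key = (source, target, dep_type)
--         if key not in seen:
--             seen.add(key)
--             deps.append({"source": source, "target": target, "dep_type": dep_type})
--
--     for (call_name, _), enclosing in zip(calls, enc):
--         if enclosing and enclosing != call_name:
--             add(enclosing, call_name, "calls")
--     for dep_type, source, target in class_bases:
--         add(source, target, dep_type)
--     for (call_name, _), enclosing in zip(calls, enc):
--         if call_name in imports and enclosing:
--             add(enclosing, call_name, "imports")
--     return deps
-- ===== Notes on version B (the rewrite author's own statement) =====
-- stated objective: alternative
-- what changed: Replaces A's per-call best/best-span minimum-tracking scan (run again for import edges) with one stable sort of func_ranges by span followed by first-match interval stabbing, with all enclosing functions precomputed once per call in a single map and reused by both the calls and imports passes; dedup goes through one shared add helper and import membership through a set.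
import Mathlib
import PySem

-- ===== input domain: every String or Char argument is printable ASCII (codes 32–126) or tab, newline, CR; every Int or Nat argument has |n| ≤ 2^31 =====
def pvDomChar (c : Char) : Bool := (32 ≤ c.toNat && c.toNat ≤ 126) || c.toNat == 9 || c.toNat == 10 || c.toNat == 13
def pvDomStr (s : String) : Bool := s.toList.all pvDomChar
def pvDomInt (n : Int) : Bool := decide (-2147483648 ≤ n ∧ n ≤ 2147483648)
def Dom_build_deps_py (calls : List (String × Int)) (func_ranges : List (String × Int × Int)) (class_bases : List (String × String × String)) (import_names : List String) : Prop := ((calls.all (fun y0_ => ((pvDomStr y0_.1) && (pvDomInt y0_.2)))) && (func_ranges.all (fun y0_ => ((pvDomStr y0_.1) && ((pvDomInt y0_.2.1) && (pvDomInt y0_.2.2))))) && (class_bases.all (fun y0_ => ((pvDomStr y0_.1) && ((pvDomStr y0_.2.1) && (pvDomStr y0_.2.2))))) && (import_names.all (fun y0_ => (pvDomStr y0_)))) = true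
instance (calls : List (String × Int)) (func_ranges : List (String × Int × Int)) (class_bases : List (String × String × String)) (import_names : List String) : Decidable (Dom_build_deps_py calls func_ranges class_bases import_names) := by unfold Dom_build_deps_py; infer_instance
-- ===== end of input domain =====

-- B replaces A's per-call min-tracking scan over func_ranges with one stable sort of the
-- ranges by span plus first-match interval stabbing, computed once per call line (alternative decomposition).

-- ===== PORT A =====
-- _find_enclosing_func: best/best_span scan; best_span = none models float("inf")
def findEnclosingA (line : Int) (func_ranges : List (String × Int × Int)) : Option String :=
  (func_ranges.foldl
    (fun (st : Option String × Option Int) t =>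
      if t.2.1 ≤ line ∧ line ≤ t.2.2 then
        let span := t.2.2 - t.2.1
        if (match st.2 with | none => true | some b => decide (span < b)) then
          (some t.1, some span)
        else st
      else st)
    (none, none)).1

def build_deps_py (calls : List (String × Int)) (func_ranges : List (String × Int × Int)) (class_bases : List (String × String × String)) (import_names : List String) : List (List (String × String)) :=
  let s1 := calls.foldl
    (fun (st : List (List (String × String)) × PySem.Set (String × String × String)) c =>
      match findEnclosingA c.2 func_ranges with
      | some enclosing =>
        if enclosing ≠ "" ∧ enclosing ≠ c.1 then
          let key := (enclosing, c.1, "calls")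
          if key ∈ st.2 then st
          else (st.1 ++ [[("source", enclosing), ("target", c.1), ("dep_type", "calls")]],
                PySem.Set.add st.2 key)
        else st
      | none => st)
    ([], PySem.Set.empty)
  let s2 := class_bases.foldl
    (fun st cb =>
      let key := (cb.2.1, cb.2.2, cb.1)
      if key ∈ st.2 then st
      else (st.1 ++ [[("source", cb.2.1), ("target", cb.2.2), ("dep_type", cb.1)]],
            PySem.Set.add st.2 key))
    s1
  let s3 := calls.foldl
    (fun st c =>
      if c.1 ∈ import_names then
        match findEnclosingA c.2 func_ranges with
        | some enclosing =>
          if enclosing ≠ "" then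
            let key := (enclosing, c.1, "imports")
            if key ∈ st.2 then st
            else (st.1 ++ [[("source", enclosing), ("target", c.1), ("dep_type", "imports")]],
                  PySem.Set.add st.2 key)
          else st
        | none => st
      else st)
    s2
  s3.1

-- ===== PORT B =====
-- first stabbing interval in the span-sorted list (next(... generator ...) in Source B)
def findFirstB (line : Int) (by_span : List (String × Int × Int)) : Option String :=
  (by_span.find? (fun t => decide (t.2.1 ≤ line) && decide (line ≤ t.2.2))).map (fun t => t.1)

-- the 'add' helper of Source B
def addDep (st : List (List (String × String)) × PySem.Set (String × String × String))
    (source target dep_type : String) :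
    List (List (String × String)) × PySem.Set (String × String × String) :=
  let key := (source, target, dep_type)
  if key ∈ st.2 then st
  else (st.1 ++ [[("source", source), ("target", target), ("dep_type", dep_type)]],
        PySem.Set.add st.2 key)

def build_deps_py_alt (calls : List (String × Int)) (func_ranges : List (String × Int × Int)) (class_bases : List (String × String × String)) (import_names : List String) : List (List (String × String)) :=
  let by_span := PySem.List.sorted func_ranges (fun r => r.2.2 - r.2.1)
  let enc := calls.map (fun c => findFirstB c.2 by_span)
  let imports := PySem.Set.ofList import_names
  let s1 := (calls.zip enc).foldl
    (fun (st : List (List (String × String)) × PySem.Set (String × String × String)) p =>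
      match p.2 with
      | some e => if e ≠ "" ∧ e ≠ p.1.1 then addDep st e p.1.1 "calls" else st
      | none => st)
    ([], PySem.Set.empty)
  let s2 := class_bases.foldl (fun st cb => addDep st cb.2.1 cb.2.2 cb.1) s1
  let s3 := (calls.zip enc).foldl
    (fun st p =>
      if p.1.1 ∈ imports then
        match p.2 with
        | some e => if e ≠ "" then addDep st e p.1.1 "imports" else st
        | none => st
      else st)
    s2
  s3.1

-- ===== PRECONDITION & SPEC =====
def Spec_build_deps_py (calls : List (String × Int)) (func_ranges : List (String × Int × Int)) (class_bases : List (String × String × String)) (import_names : List String) (out : List (List (String × String))) : Prop := out = build_deps_py_alt calls func_ranges class_bases import_names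
instance (calls : List (String × Int)) (func_ranges : List (String × Int × Int)) (class_bases : List (String × String × String)) (import_names : List String) (out : List (List (String × String))) : Decidable (Spec_build_deps_py calls func_ranges class_bases import_names out) := by unfold Spec_build_deps_py; infer_instance

-- ===== CLAIM (what is proved, stated in full; the proofs are below) =====
def Claim_equal_build_deps_py : Prop := ∀ (calls : List (String × Int)) (func_ranges : List (String × Int × Int)) (class_bases : List (String × String × String)) (import_names : List String), Dom_build_deps_py calls func_ranges class_bases import_names → Spec_build_deps_py calls func_ranges class_bases import_names (build_deps_py calls func_ranges class_bases import_names)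


-- ===== LEMMAS AND PROOFS =====
def pvSpan (t : String × Int × Int) : Int := t.2.2 - t.2.1

def pvMatch (line : Int) (t : String × Int × Int) : Bool :=
  decide (t.2.1 ≤ line) && decide (line ≤ t.2.2)

def pvG (line : Int) (acc : Option (String × Int)) (t : String × Int × Int) :
    Option (String × Int) :=
  if pvMatch line t then
    match acc with
    | none => some (t.1, pvSpan t)
    | some b => if pvSpan t < b.2 then some (t.1, pvSpan t) else acc
  else acc

def pvPair (acc : Option (String × Int)) : Option String × Option Int :=
  match acc with
  | none => (none, none)
  | some b => (some b.1, some b.2)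

theorem pv_bridge (line : Int) (fr : List (String × Int × Int)) (acc : Option (String × Int)) :
    fr.foldl
      (fun (st : Option String × Option Int) t =>
        if t.2.1 ≤ line ∧ line ≤ t.2.2 then
          let span := t.2.2 - t.2.1
          if (match st.2 with | none => true | some b => decide (span < b)) then
            (some t.1, some span)
          else st
        else st)
      (pvPair acc)
    = pvPair (fr.foldl (pvG line) acc) := by
  induction fr generalizing acc with
  | nil => rfl
  | cons x xs ih =>
    simp only [List.foldl_cons]
    have hstep : (if x.2.1 ≤ line ∧ line ≤ x.2.2 then
        if (match (pvPair acc).2 with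
            | none => true
            | some b => decide (x.2.2 - x.2.1 < b)) = true then
          (some x.1, some (x.2.2 - x.2.1))
        else pvPair acc
      else pvPair acc) = pvPair (pvG line acc x) := ?_
    rw [hstep]
    exact ih _
    cases acc with
    | none =>
      by_cases h : x.2.1 ≤ line ∧ line ≤ x.2.2
      · simp [pvG, pvPair, pvMatch, pvSpan, h.1, h.2]
      · simp only [if_neg h]
        have : pvMatch line x = false := by
          simp [pvMatch]; omega
        simp [pvG, this]
    | some b =>
      by_cases h : x.2.1 ≤ line ∧ line ≤ x.2.2
      · by_cases h2 : x.2.2 - x.2.1 < b.2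
        · simp [pvG, pvPair, pvMatch, pvSpan, h.1, h.2, h2]
        · simp [pvG, pvPair, pvMatch, pvSpan, h.1, h.2, h2]
      · simp only [if_neg h]
        have : pvMatch line x = false := by
          simp [pvMatch]; omega
        simp [pvG, this]

theorem pv_find_insert_notmatch (line : Int) (bf : (String × Int × Int) → (String × Int × Int) → Bool)
    (x : String × Int × Int) (hx : pvMatch line x = false) :
    ∀ s : List (String × Int × Int),
      List.find? (pvMatch line) (PySem.List.insertBy bf x s) = List.find? (pvMatch line) s := by
  intro s
  induction s with
  | nil => simp [PySem.List.insertBy, hx]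
  | cons y ys ih =>
    by_cases hb : bf x y = true
    · simp [PySem.List.insertBy, hb, hx]
    · simp only [PySem.List.insertBy, if_neg hb]
      cases hy : pvMatch line y with
      | true => simp [hy]
      | false => simp [hy, ih]

theorem pv_find_insert_match (line : Int) (x : String × Int × Int) (hx : pvMatch line x = true) :
    ∀ s : List (String × Int × Int),
      s.Pairwise (fun a b => pvSpan a ≤ pvSpan b) →
      List.find? (pvMatch line)
          (PySem.List.insertBy (fun a b => decide (pvSpan a < pvSpan b)) x s)
        = (match List.find? (pvMatch line) s with
           | none => some x
           | some t => if pvSpan x < pvSpan t then some x else some t) := by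
  intro s
  induction s with
  | nil => intro _; simp [PySem.List.insertBy, hx]
  | cons y ys ih =>
    intro hp
    rw [List.pairwise_cons] at hp
    by_cases hb : pvSpan x < pvSpan y
    · simp only [PySem.List.insertBy, decide_eq_true_eq, if_pos hb]
      rw [List.find?_cons, hx]
      cases hy : pvMatch line y with
      | true => simp [hy, if_pos hb]
      | false =>
        simp only [List.find?_cons, hy]
        cases ht : List.find? (pvMatch line) ys with
        | none => simp
        | some t =>
          have htmem : t ∈ ys := List.mem_of_find?_eq_some ht
          have : pvSpan x < pvSpan t := lt_of_lt_of_le hb (hp.1 t htmem)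
          simp [this]
    · simp only [PySem.List.insertBy, decide_eq_true_eq, if_neg hb]
      rw [List.find?_cons]
      cases hy : pvMatch line y with
      | true =>
        simp only [List.find?_cons, hy]
        simp [if_neg hb]
      | false =>
        simp only [List.find?_cons, hy]
        exact ih hp.2

theorem pv_fold_eq_find (line : Int) (fr : List (String × Int × Int)) :
    fr.foldl (pvG line) none
      = (List.find? (pvMatch line) (PySem.List.sorted fr pvSpan)).map
          (fun t => (t.1, pvSpan t)) := by
  induction fr using List.reverseRecOn with
  | nil => rfl
  | append_singleton xs x ih =>
    have hsorted : PySem.List.sorted (xs ++ [x]) pvSpan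
        = PySem.List.insertBy (fun a b => decide (pvSpan a < pvSpan b)) x
            (PySem.List.sorted xs pvSpan) := by
      rw [PySem.List.sorted_eq_foldl_insertBy, PySem.List.sorted_eq_foldl_insertBy,
        List.foldl_append, List.foldl_cons, List.foldl_nil]
    rw [List.foldl_append, List.foldl_cons, List.foldl_nil, ih, hsorted]
    cases hx : pvMatch line x with
    | false =>
      rw [pv_find_insert_notmatch line _ x hx]
      cases List.find? (pvMatch line) (PySem.List.sorted xs pvSpan) with
      | none => simp [pvG, hx]
      | some t => simp [pvG, hx]
    | true =>
      rw [pv_find_insert_match line x hx _ (PySem.List.sorted_pairwise xs pvSpan)]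
      cases List.find? (pvMatch line) (PySem.List.sorted xs pvSpan) with
      | none => simp [pvG, hx]
      | some t =>
        by_cases hlt : pvSpan x < pvSpan t
        · simp [pvG, hx, hlt]
        · simp [pvG, hx, hlt]

theorem pv_find_eq (line : Int) (fr : List (String × Int × Int)) :
    findEnclosingA line fr
      = findFirstB line (PySem.List.sorted fr (fun r => r.2.2 - r.2.1)) := by
  have hkey : (fun r : String × Int × Int => r.2.2 - r.2.1) = pvSpan := rfl
  have h0 : (none, none) = pvPair none := rfl
  unfold findEnclosingA findFirstB
  rw [hkey, h0, pv_bridge, pv_fold_eq_find]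
  have hm : (fun t : String × Int × Int => decide (t.2.1 ≤ line) && decide (line ≤ t.2.2))
      = pvMatch line := rfl
  rw [hm]
  cases List.find? (pvMatch line) (PySem.List.sorted fr pvSpan) with
  | none => rfl
  | some t => rfl

theorem pv_zip_map_foldl {α β γ : Type} (l : List α) (f : α → β)
    (F : γ → α × β → γ) (init : γ) :
    (l.zip (l.map f)).foldl F init = l.foldl (fun st c => F st (c, f c)) init := by
  induction l generalizing init with
  | nil => rfl
  | cons x xs ih => simp [List.foldl_cons, ih]

-- ===== VERDICT (by name: the statement is the Claim_ definition above) =====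
theorem build_deps_py_spec : Claim_equal_build_deps_py := by
  intro calls func_ranges class_bases import_names _
  have hfind : ∀ line, findFirstB line
      (PySem.List.sorted func_ranges (fun r => r.2.2 - r.2.1)) = findEnclosingA line func_ranges :=
    fun line => (pv_find_eq line func_ranges).symm
  simp only [Spec_build_deps_py, build_deps_py, build_deps_py_alt]
  rw [pv_zip_map_foldl, pv_zip_map_foldl]
  simp only [hfind, addDep, PySem.Set.mem_ofList]
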